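-- pv_equiv track=rewrite | github.com/DancingOnAir/LeetcodePythonSolution | string/2120_execution_of_all_suffix_instructions_staying_in_a_grid.py | executeInstructions1
-- ===== SOURCE A (Python) =====
-- from typing import List
--
-- def executeInstructions1(n: int, startPos: List[int], s: str) -> List[int]:
--     def get_num_instruction(s):
--         # x, y
--         moves = [0, 0]
--         for i, ch in enumerate(s):
--             if ch == 'R':
--                 moves[0] += 1
--             elif ch == 'L':
--                 moves[0] -= 1
--             elif ch == 'U':
--                 moves[1] += 1
--             else:
--                 moves[1] -= 1
--
--             if (moves[0] > 0 and moves[0] > limits[0]) or (moves[0] < 0 and abs(moves[0]) > limits[2]) or (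
--                     moves[1] > 0 and moves[1] > limits[3]) or (moves[1] < 0 and abs(moves[1]) > limits[1]):
--                 return i
--
--         return len(s)
--
--     # RDLU
--     limits = [n - 1 - startPos[1], n - 1 - startPos[0], startPos[1], startPos[0]]
--     res = list()
--     for i in range(len(s)):
--         res.append(get_num_instruction(s[i:]))
--     return res
-- ===== SOURCE B (Python) =====
-- from typing import List
--
-- def executeInstructions1(n: int, startPos: List[int], s: str) -> List[int]:
--     # One backward pass: prefix sums of the moves + "next index where the
--     # prefix sum hits a given value" dictionaries; since each prefix sum changes
--     # by at most 1 per step, the first boundary violation of a suffix is the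
--     # earliest exact hit of one of four threshold values.
--     r, c = startPos[0], startPos[1]
--     m = len(s)
--     px = [0] * (m + 1)
--     py = [0] * (m + 1)
--     for j, ch in enumerate(s):
--         dx = 1 if ch == 'R' else (-1 if ch == 'L' else 0)
--         dy = 1 if ch == 'U' else (0 if ch in ('R', 'L') else -1)
--         px[j + 1] = px[j] + dx
--         py[j + 1] = py[j] + dy
--     tR = max(n - 1 - c, 0) + 1   # first x-value (relative) that exceeds the right limit
--     tL = max(c, 0) + 1           # first x-value below the left limit (negated)
--     tU = max(startPos[0], 0) + 1 # first y-value that exceeds the up limit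
--     tD = max(n - 1 - r, 0) + 1   # first y-value below the down limit (negated)
--     INF = m + 1
--     next_x = {}
--     next_y = {}
--     res = [0] * m
--     for i in range(m - 1, -1, -1):
--         next_x[px[i + 1]] = i + 1
--         next_y[py[i + 1]] = i + 1
--         j = min(next_x.get(px[i] + tR, INF), next_x.get(px[i] - tL, INF),
--                 next_y.get(py[i] + tU, INF), next_y.get(py[i] - tD, INF))
--         res[i] = m - i if j > m else j - i - 1
--     return res
-- ===== Notes on version B (the rewrite author's own statement) =====
-- stated objective: alternative
-- what changed: A rescans every suffix with a fresh simulation (O(m^2)); B computes prefix sums of the moves once and, scanning once from the right with 'next index where the prefix sum equals v' dictionaries, finds each suffix's first boundary violation as the earliest exact hit of one of four threshold values (prefix sums change by at most 1 per step).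
import Mathlib
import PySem

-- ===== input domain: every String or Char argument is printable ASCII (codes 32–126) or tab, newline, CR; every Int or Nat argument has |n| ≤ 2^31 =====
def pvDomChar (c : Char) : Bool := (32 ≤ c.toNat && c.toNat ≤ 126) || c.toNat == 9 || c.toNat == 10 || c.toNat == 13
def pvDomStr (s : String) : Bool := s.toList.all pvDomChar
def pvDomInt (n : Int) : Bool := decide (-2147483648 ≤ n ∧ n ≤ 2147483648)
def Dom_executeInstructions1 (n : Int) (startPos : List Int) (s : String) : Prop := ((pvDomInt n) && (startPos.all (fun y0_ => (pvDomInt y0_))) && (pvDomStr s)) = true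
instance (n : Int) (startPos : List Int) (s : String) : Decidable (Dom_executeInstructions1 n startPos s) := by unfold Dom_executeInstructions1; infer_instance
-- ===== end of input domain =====

-- B replaces A's per-suffix rescan with a single backward pass over prefix sums
-- plus first-hit dictionaries (a different algorithm of linear size). Equivalence
-- is proved for startPos with at least two entries (otherwise Python A raises
-- IndexError).

-- ===== PORT A =====
def pvStepA (mx my : Int) (c : Char) : Int × Int :=
  if c = 'R' then (mx + 1, my)
  else if c = 'L' then (mx - 1, my)
  else if c = 'U' then (mx, my + 1)
  else (mx, my - 1)

def pvBadA (L0 L1 L2 L3 mx my : Int) : Bool :=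
  decide ((0 < mx ∧ L0 < mx) ∨ (mx < 0 ∧ L2 < |mx|) ∨ (0 < my ∧ L3 < my) ∨ (my < 0 ∧ L1 < |my|))

def pvGoA (L0 L1 L2 L3 : Int) : List Char → Int → Int → Int → Int
  | [], i, _, _ => i
  | c :: rest, i, mx, my =>
    let p := pvStepA mx my c
    if pvBadA L0 L1 L2 L3 p.1 p.2 then i
    else pvGoA L0 L1 L2 L3 rest (i + 1) p.1 p.2

-- s[i:] with 0 ≤ i is exactly List.drop i on the characters
def executeInstructions1 (n : Int) (startPos : List Int) (s : String) : List Int :=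
  let l0 := n - 1 - (PySem.List.pyGet? startPos 1).getD 0
  let l1 := n - 1 - (PySem.List.pyGet? startPos 0).getD 0
  let l2 := (PySem.List.pyGet? startPos 1).getD 0
  let l3 := (PySem.List.pyGet? startPos 0).getD 0
  (List.range s.toList.length).map (fun i => pvGoA l0 l1 l2 l3 (s.toList.drop i) 0 0 0)

-- ===== PORT B =====
def pvDxB (c : Char) : Int := if c = 'R' then 1 else if c = 'L' then -1 else 0
def pvDyB (c : Char) : Int := if c = 'U' then 1 else if c = 'R' ∨ c = 'L' then 0 else -1

def pvScanB (f : Char → Int) (acc : Int) : List Char → List Int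
  | [] => [acc]
  | c :: rest => acc :: pvScanB f (acc + f c) rest

def pvGoB (px py : List Int) (tR tL tU tD : Int) (m : Nat) :
    Nat → PySem.Dict Int Int → PySem.Dict Int Int → List Int → List Int
  | 0, _, _, res => res
  | k + 1, dx, dy, res =>
    let dx' := dx.insert (px.getD (k + 1) 0) ((k : Int) + 1)
    let dy' := dy.insert (py.getD (k + 1) 0) ((k : Int) + 1)
    let inf : Int := (m : Int) + 1
    let j := min (min (dx'.getD (px.getD k 0 + tR) inf) (dx'.getD (px.getD k 0 - tL) inf))
                 (min (dy'.getD (py.getD k 0 + tU) inf) (dy'.getD (py.getD k 0 - tD) inf))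
    pvGoB px py tR tL tU tD m k dx' dy'
      ((if (m : Int) < j then (m : Int) - (k : Int) else j - (k : Int) - 1) :: res)

def executeInstructions1_alt (n : Int) (startPos : List Int) (s : String) : List Int :=
  let r := (PySem.List.pyGet? startPos 0).getD 0
  let c := (PySem.List.pyGet? startPos 1).getD 0
  let cs := s.toList
  let m := cs.length
  let px := pvScanB pvDxB 0 cs
  let py := pvScanB pvDyB 0 cs
  pvGoB px py (max (n - 1 - c) 0 + 1) (max c 0 + 1) (max r 0 + 1) (max (n - 1 - r) 0 + 1)
    m m PySem.Dict.empty PySem.Dict.empty []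

-- ===== PRECONDITION & SPEC =====
-- Pre_ excludes startPos shorter than two entries: there Python A raises IndexError.
def Pre_executeInstructions1 (n : Int) (startPos : List Int) (s : String) : Prop :=
  2 ≤ startPos.length
instance (n : Int) (startPos : List Int) (s : String) : Decidable (Pre_executeInstructions1 n startPos s) := by unfold Pre_executeInstructions1; infer_instance

def pvWitness_executeInstructions1 : Int × List Int × String := (2, [0, 0], "RUD")

def Spec_executeInstructions1 (n : Int) (startPos : List Int) (s : String) (out : List Int) : Prop := out = executeInstructions1_alt n startPos s
instance (n : Int) (startPos : List Int) (s : String) (out : List Int) : Decidable (Spec_executeInstructions1 n startPos s out) := by unfold Spec_executeInstructions1; infer_instance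

-- ===== CLAIM (what is proved, stated in full; the proofs are below) =====
def Claim_equal_executeInstructions1 : Prop := ∀ (n : Int) (startPos : List Int) (s : String), Dom_executeInstructions1 n startPos s → Pre_executeInstructions1 n startPos s → Spec_executeInstructions1 n startPos s (executeInstructions1 n startPos s)

-- ===== LEMMAS AND PROOFS =====

-- prefix sum of f over the first j characters
def PXF (f : Char → Int) (cs : List Char) (j : Nat) : Int := ((cs.take j).map f).sum

-- first index j in (k, m] with g j, else m+1 (as an Int)
def pvHit (g : Nat → Bool) (k m : Nat) : Int :=
  match (List.range' (k + 1) (m - k)).find? g with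
  | some j => (j : Int)
  | none => (m : Int) + 1

-- A's answer for the suffix starting at i, as a first-violation search
def pvAns (L0 L1 L2 L3 : Int) (cs : List Char) (i : Nat) : Int :=
  match (List.range' (i + 1) (cs.length - i)).find?
      (fun u => pvBadA L0 L1 L2 L3 (PXF pvDxB cs u - PXF pvDxB cs i)
        (PXF pvDyB cs u - PXF pvDyB cs i)) with
  | some u => (u : Int) - i - 1
  | none => (cs.length : Int) - i

-- first index j in (k, m] whose prefix sum of f equals v, else m+1
def pvHitP (f : Char → Int) (cs : List Char) (k : Nat) (v : Int) : Int :=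
  pvHit (fun j => decide (PXF f cs j = v)) k cs.length

theorem pvStepA_eq (mx my : Int) (c : Char) :
    pvStepA mx my c = (mx + pvDxB c, my + pvDyB c) := by
  unfold pvStepA pvDxB pvDyB
  by_cases h1 : c = 'R' <;> by_cases h2 : c = 'L' <;> by_cases h3 : c = 'U' <;>
    simp_all <;> omega

theorem pvBadA_iff (L0 L1 L2 L3 x y : Int) :
    pvBadA L0 L1 L2 L3 x y = true ↔
      (max L0 0 + 1 ≤ x ∨ x ≤ -(max L2 0 + 1) ∨ max L3 0 + 1 ≤ y ∨ y ≤ -(max L1 0 + 1)) := by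
  simp only [pvBadA, decide_eq_true_eq, Int.abs_eq_natAbs]
  omega

theorem PXF_succ (f : Char → Int) (cs : List Char) (j : Nat) (h : j < cs.length) :
    PXF f cs (j + 1) = PXF f cs j + f cs[j] := by
  have h' : j < (cs.map f).length := by simpa using h
  have := List.sum_take_succ (cs.map f) j h'
  simpa [PXF, List.map_take] using this

theorem PXF_succ_ge (f : Char → Int) (cs : List Char) (j : Nat) (h : cs.length ≤ j) :
    PXF f cs (j + 1) = PXF f cs j := by
  unfold PXF
  rw [List.take_of_length_le h, List.take_of_length_le (by omega)]

theorem PXF_step (f : Char → Int) (cs : List Char) (hf : ∀ c, -1 ≤ f c ∧ f c ≤ 1) (j : Nat) :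
    PXF f cs j - 1 ≤ PXF f cs (j + 1) ∧ PXF f cs (j + 1) ≤ PXF f cs j + 1 := by
  by_cases h : j < cs.length
  · rw [PXF_succ f cs j h]; have := hf cs[j]; omega
  · rw [PXF_succ_ge f cs j (by omega)]; omega

theorem pvScanB_getD (f : Char → Int) :
    ∀ (cs : List Char) (a : Int) (j : Nat), j ≤ cs.length →
      (pvScanB f a cs).getD j 0 = a + PXF f cs j := by
  intro cs
  induction cs with
  | nil =>
    intro a j hj
    have hj0 : j = 0 := by simpa using hj
    subst hj0
    simp [pvScanB, PXF]
  | cons c rest ih =>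
    intro a j hj
    cases j with
    | zero => simp [pvScanB, PXF]
    | succ j =>
      simp only [pvScanB, List.getD_cons_succ]
      rw [ih (a + f c) j (by simpa using hj)]
      simp [PXF]
      ring

theorem find?_range'_spec (g : Nat → Bool) :
    ∀ (n a u : Nat), (List.range' a n).find? g = some u →
      a ≤ u ∧ u < a + n ∧ g u = true ∧ ∀ v, a ≤ v → v < u → g v = false := by
  intro n
  induction n with
  | zero => intro a u h; simp at h
  | succ n ih =>
    intro a u h
    rw [List.range'_succ] at h
    by_cases hga : g a
    · rw [List.find?_cons_of_pos hga] at h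
      obtain rfl : a = u := by simpa using h
      exact ⟨le_refl _, by omega, hga, fun v hv1 hv2 => absurd (by omega) (by omega : ¬ v < v)⟩
    · rw [List.find?_cons_of_neg (by simpa using hga)] at h
      obtain ⟨h1, h2, h3, h4⟩ := ih (a + 1) u h
      refine ⟨by omega, by omega, h3, fun v hv1 hv2 => ?_⟩
      rcases Nat.eq_or_lt_of_le hv1 with rfl | hv
      · simpa using hga
      · exact h4 v (by omega) hv2

theorem pvHit_ge_of_imp (g B : Nat → Bool) (k m : Nat)
    (himp : ∀ j, k < j → j ≤ m → g j = true → B j = true) :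
    pvHit B k m ≤ pvHit g k m := by
  unfold pvHit
  rcases hg : (List.range' (k + 1) (m - k)).find? g with _ | w
  · rcases hB : (List.range' (k + 1) (m - k)).find? B with _ | u
    · simp only
      omega
    · obtain ⟨h1, h2, _, _⟩ := find?_range'_spec B _ _ _ hB
      simp only
      omega
  · obtain ⟨hw1, hw2, hw3, _⟩ := find?_range'_spec g _ _ _ hg
    have hBw : B w = true := himp w (by omega) (by omega) hw3
    rcases hB : (List.range' (k + 1) (m - k)).find? B with _ | u
    · exact absurd hBw (by simpa using (List.find?_eq_none.mp hB w (by simp [List.mem_range'_1]; omega)))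
    · obtain ⟨hu1, hu2, _, hu4⟩ := find?_range'_spec B _ _ _ hB
      simp only
      by_contra hcon
      have : w < u := by omega
      exact absurd hBw (by simpa using hu4 w (by omega) this)

theorem pvHit_le_at (g : Nat → Bool) (k m u : Nat) (hu : k < u) (hum : u ≤ m)
    (hg : g u = true) : pvHit g k m ≤ (u : Int) := by
  unfold pvHit
  rcases hG : (List.range' (k + 1) (m - k)).find? g with _ | w
  · exact absurd hg (by simpa using (List.find?_eq_none.mp hG u (by simp [List.mem_range'_1]; omega)))
  · obtain ⟨h1, h2, h3, h4⟩ := find?_range'_spec g _ _ _ hG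
    simp only
    by_contra hcon
    have : u < w := by omega
    exact absurd hg (by simpa using h4 u (by omega) this)

theorem pvHit_min4 (B g1 g2 g3 g4 : Nat → Bool) (k m : Nat)
    (himp : ∀ j, k < j → j ≤ m →
      (g1 j = true ∨ g2 j = true ∨ g3 j = true ∨ g4 j = true) → B j = true)
    (hfirst : ∀ u, k < u → u ≤ m → B u = true → (∀ v, k < v → v < u → B v = false) →
      (g1 u = true ∨ g2 u = true ∨ g3 u = true ∨ g4 u = true)) :
    min (min (pvHit g1 k m) (pvHit g2 k m)) (min (pvHit g3 k m) (pvHit g4 k m))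
      = pvHit B k m := by
  have h1 := pvHit_ge_of_imp g1 B k m (fun j hj hjm hg => himp j hj hjm (Or.inl hg))
  have h2 := pvHit_ge_of_imp g2 B k m (fun j hj hjm hg => himp j hj hjm (Or.inr (Or.inl hg)))
  have h3 := pvHit_ge_of_imp g3 B k m (fun j hj hjm hg => himp j hj hjm (Or.inr (Or.inr (Or.inl hg))))
  have h4 := pvHit_ge_of_imp g4 B k m (fun j hj hjm hg => himp j hj hjm (Or.inr (Or.inr (Or.inr hg))))
  rcases hB : (List.range' (k + 1) (m - k)).find? B with _ | u
  · -- no violation in the window: every exact hit would be one, so all hits are m+1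
    have hnone : ∀ (g : Nat → Bool), (∀ j, k < j → j ≤ m → g j = true → B j = true) →
        pvHit g k m = (m : Int) + 1 := by
      intro g himp'
      unfold pvHit
      rcases hg : (List.range' (k + 1) (m - k)).find? g with _ | w
      · rfl
      · obtain ⟨hw1, hw2, hw3, _⟩ := find?_range'_spec g _ _ _ hg
        have := himp' w (by omega) (by omega) hw3
        exact absurd this (by simpa using (List.find?_eq_none.mp hB w (by simp [List.mem_range'_1]; omega)))
    rw [hnone g1 (fun j hj hjm hg => himp j hj hjm (Or.inl hg)),
        hnone g2 (fun j hj hjm hg => himp j hj hjm (Or.inr (Or.inl hg))),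
        hnone g3 (fun j hj hjm hg => himp j hj hjm (Or.inr (Or.inr (Or.inl hg)))),
        hnone g4 (fun j hj hjm hg => himp j hj hjm (Or.inr (Or.inr (Or.inr hg))))]
    have hBm : pvHit B k m = (m : Int) + 1 := by unfold pvHit; rw [hB]
    rw [hBm]
    omega
  · obtain ⟨hu1, hu2, hu3, hu4⟩ := find?_range'_spec B _ _ _ hB
    have hBu : pvHit B k m = (u : Int) := by unfold pvHit; rw [hB]
    have hwit := hfirst u (by omega) (by omega) hu3 (fun v hv1 hv2 => hu4 v (by omega) hv2)
    rw [hBu] at h1 h2 h3 h4 ⊢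
    rcases hwit with hw | hw | hw | hw
    · have := pvHit_le_at g1 k m u (by omega) (by omega) hw; omega
    · have := pvHit_le_at g2 k m u (by omega) (by omega) hw; omega
    · have := pvHit_le_at g3 k m u (by omega) (by omega) hw; omega
    · have := pvHit_le_at g4 k m u (by omega) (by omega) hw; omega

theorem pvFirstCross (f : Nat → Int) (t : Int) (ht : 1 ≤ t) (k u : Nat)
    (hstep : ∀ j, f (j + 1) ≤ f j + 1) (hku : k < u)
    (hge : t ≤ f u - f k) (hprev : ∀ v, k < v → v < u → f v - f k < t) :
    f u - f k = t := by
  obtain ⟨w, rfl⟩ : ∃ w, u = w + 1 := ⟨u - 1, by omega⟩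
  have h1 := hstep w
  by_cases hw : w = k
  · subst hw; omega
  · have := hprev w (by omega) (by omega); omega

def pvMin4 (tR tL tU tD : Int) (cs : List Char) (k : Nat) : Int :=
  min (min (pvHitP pvDxB cs k (PXF pvDxB cs k + tR)) (pvHitP pvDxB cs k (PXF pvDxB cs k - tL)))
      (min (pvHitP pvDyB cs k (PXF pvDyB cs k + tU)) (pvHitP pvDyB cs k (PXF pvDyB cs k - tD)))

def pvValB (tR tL tU tD : Int) (cs : List Char) (k : Nat) : Int :=
  if (cs.length : Int) < pvMin4 tR tL tU tD cs k then (cs.length : Int) - (k : Int)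
  else pvMin4 tR tL tU tD cs k - (k : Int) - 1

theorem pvDxB_bound (c : Char) : -1 ≤ pvDxB c ∧ pvDxB c ≤ 1 := by
  unfold pvDxB; split_ifs <;> omega

theorem pvDyB_bound (c : Char) : -1 ≤ pvDyB c ∧ pvDyB c ≤ 1 := by
  unfold pvDyB; split_ifs <;> omega

theorem pvGoA_spec (L0 L1 L2 L3 : Int) (cs : List Char) (i : Nat) :
    ∀ (fuel j : Nat), i ≤ j → j ≤ cs.length → cs.length - j = fuel →
      pvGoA L0 L1 L2 L3 (cs.drop j) ((j : Int) - (i : Int))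
          (PXF pvDxB cs j - PXF pvDxB cs i) (PXF pvDyB cs j - PXF pvDyB cs i)
        = match (List.range' (j + 1) (cs.length - j)).find?
            (fun u => pvBadA L0 L1 L2 L3 (PXF pvDxB cs u - PXF pvDxB cs i)
              (PXF pvDyB cs u - PXF pvDyB cs i)) with
          | some u => (u : Int) - (i : Int) - 1
          | none => (cs.length : Int) - (i : Int) := by
  intro fuel
  induction fuel with
  | zero =>
    intro j h1 h2 h3
    have hj : j = cs.length := by omega
    subst hj
    rw [List.drop_eq_nil_of_le (le_refl _), Nat.sub_self, List.range'_zero]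
    simp [pvGoA]
  | succ f ih =>
    intro j h1 h2 h3
    have hj : j < cs.length := by omega
    rw [List.drop_eq_getElem_cons hj]
    simp only [pvGoA, pvStepA_eq]
    have hx : PXF pvDxB cs j - PXF pvDxB cs i + pvDxB cs[j]
        = PXF pvDxB cs (j + 1) - PXF pvDxB cs i := by
      rw [PXF_succ _ _ _ hj]; ring
    have hy : PXF pvDyB cs j - PXF pvDyB cs i + pvDyB cs[j]
        = PXF pvDyB cs (j + 1) - PXF pvDyB cs i := by
      rw [PXF_succ _ _ _ hj]; ring
    rw [hx, hy]
    have hr : cs.length - j = (cs.length - (j + 1)) + 1 := by omega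
    rw [hr, List.range'_succ]
    by_cases hbad : pvBadA L0 L1 L2 L3 (PXF pvDxB cs (j + 1) - PXF pvDxB cs i)
        (PXF pvDyB cs (j + 1) - PXF pvDyB cs i) = true
    · rw [if_pos hbad, List.find?_cons_of_pos (by simpa using hbad)]
      push_cast
      ring
    · rw [if_neg hbad, List.find?_cons_of_neg (by simpa using hbad)]
      have hc : (j : Int) - (i : Int) + 1 = ((j + 1 : Nat) : Int) - (i : Int) := by
        push_cast; ring
      rw [hc]
      exact ih (j + 1) (by omega) (by omega) (by omega)

theorem pvHitP_step (f : Char → Int) (cs : List Char) (k : Nat) (hk : k < cs.length) (v : Int) :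
    pvHitP f cs k v
      = if v = PXF f cs (k + 1) then ((k : Int) + 1) else pvHitP f cs (k + 1) v := by
  unfold pvHitP pvHit
  have hr : cs.length - k = (cs.length - (k + 1)) + 1 := by omega
  rw [hr, List.range'_succ]
  by_cases hv : v = PXF f cs (k + 1)
  · rw [if_pos hv, List.find?_cons_of_pos (by simp [hv])]
    simp
  · rw [if_neg hv, List.find?_cons_of_neg (by simpa using fun h => hv h.symm)]

theorem pvHitP_base (f : Char → Int) (cs : List Char) (v : Int) :
    pvHitP f cs cs.length v = (cs.length : Int) + 1 := by
  unfold pvHitP pvHit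
  rw [Nat.sub_self, List.range'_zero]
  simp

theorem pvGoB_spec (tR tL tU tD : Int) (cs : List Char) :
    ∀ (k : Nat), k ≤ cs.length → ∀ (dx dy : PySem.Dict Int Int) (res : List Int),
      (∀ v, dx.getD v ((cs.length : Int) + 1) = pvHitP pvDxB cs k v) →
      (∀ v, dy.getD v ((cs.length : Int) + 1) = pvHitP pvDyB cs k v) →
      pvGoB (pvScanB pvDxB 0 cs) (pvScanB pvDyB 0 cs) tR tL tU tD cs.length k dx dy res
        = (List.range k).map (pvValB tR tL tU tD cs) ++ res := by
  intro k
  induction k with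
  | zero =>
    intro _ dx dy res _ _
    simp [pvGoB]
  | succ k ih =>
    intro hk dx dy res hdx hdy
    have hklt : k < cs.length := by omega
    have hdx' : ∀ v, (dx.insert (PXF pvDxB cs (k + 1)) ((k : Int) + 1)).getD v
        ((cs.length : Int) + 1) = pvHitP pvDxB cs k v := by
      intro v
      rw [PySem.Dict.getD_insert, pvHitP_step pvDxB cs k hklt v]
      split_ifs with h
      · rfl
      · exact hdx v
    have hdy' : ∀ v, (dy.insert (PXF pvDyB cs (k + 1)) ((k : Int) + 1)).getD v
        ((cs.length : Int) + 1) = pvHitP pvDyB cs k v := by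
      intro v
      rw [PySem.Dict.getD_insert, pvHitP_step pvDyB cs k hklt v]
      split_ifs with h
      · rfl
      · exact hdy v
    simp only [pvGoB]
    rw [pvScanB_getD pvDxB cs 0 (k + 1) (by omega), pvScanB_getD pvDyB cs 0 (k + 1) (by omega),
        pvScanB_getD pvDxB cs 0 k (by omega), pvScanB_getD pvDyB cs 0 k (by omega)]
    simp only [zero_add]
    rw [hdx' (PXF pvDxB cs k + tR), hdx' (PXF pvDxB cs k - tL),
        hdy' (PXF pvDyB cs k + tU), hdy' (PXF pvDyB cs k - tD)]
    rw [ih (by omega) _ _ _ hdx' hdy']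
    rw [List.range_succ]
    simp [pvValB, pvMin4]

theorem pvValB_eq_pvAns (L0 L1 L2 L3 : Int) (cs : List Char) (k : Nat) (hk : k < cs.length) :
    pvValB (max L0 0 + 1) (max L2 0 + 1) (max L3 0 + 1) (max L1 0 + 1) cs k
      = pvAns L0 L1 L2 L3 cs k := by
  have hmin : pvMin4 (max L0 0 + 1) (max L2 0 + 1) (max L3 0 + 1) (max L1 0 + 1) cs k
      = pvHit (fun u => pvBadA L0 L1 L2 L3 (PXF pvDxB cs u - PXF pvDxB cs k)
          (PXF pvDyB cs u - PXF pvDyB cs k)) k cs.length := by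
    unfold pvMin4 pvHitP
    apply pvHit_min4
    · -- every exact hit of a threshold value is a violation
      intro j hj hjm hg
      rcases hg with hg | hg | hg | hg <;> rw [decide_eq_true_eq] at hg <;>
        rw [pvBadA_iff]
      · left; omega
      · right; left; omega
      · right; right; left; omega
      · right; right; right; omega
    · -- the first violation is an exact hit of one of the four threshold values
      intro u hu hum hB hprev
      have hprev' : ∀ v, k < v → v < u →
          PXF pvDxB cs v - PXF pvDxB cs k < max L0 0 + 1 ∧
          -(max L2 0 + 1) < PXF pvDxB cs v - PXF pvDxB cs k ∧
          PXF pvDyB cs v - PXF pvDyB cs k < max L3 0 + 1 ∧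
          -(max L1 0 + 1) < PXF pvDyB cs v - PXF pvDyB cs k := by
        intro v hv1 hv2
        have hb := hprev v hv1 hv2
        have hb' : ¬ (pvBadA L0 L1 L2 L3 (PXF pvDxB cs v - PXF pvDxB cs k)
            (PXF pvDyB cs v - PXF pvDyB cs k) = true) := by simp [hb]
        rw [pvBadA_iff] at hb'
        push Not at hb'
        omega
      rw [pvBadA_iff] at hB
      rcases hB with hB | hB | hB | hB
      · left
        rw [decide_eq_true_eq]
        have h := pvFirstCross (fun j => PXF pvDxB cs j) (max L0 0 + 1) (by omega) k u
          (fun j => by show PXF pvDxB cs (j + 1) ≤ PXF pvDxB cs j + 1; have := PXF_step pvDxB cs pvDxB_bound j; omega)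
          hu (by show max L0 0 + 1 ≤ PXF pvDxB cs u - PXF pvDxB cs k; omega)
          (fun v hv1 hv2 => by
            show PXF pvDxB cs v - PXF pvDxB cs k < max L0 0 + 1
            have := hprev' v hv1 hv2; omega)
        simp only [] at h
        omega
      · right; left
        rw [decide_eq_true_eq]
        have h := pvFirstCross (fun j => -(PXF pvDxB cs j)) (max L2 0 + 1) (by omega) k u
          (fun j => by show -(PXF pvDxB cs (j + 1)) ≤ -(PXF pvDxB cs j) + 1; have := PXF_step pvDxB cs pvDxB_bound j; omega)
          hu (by show max L2 0 + 1 ≤ -(PXF pvDxB cs u) - -(PXF pvDxB cs k); omega)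
          (fun v hv1 hv2 => by
            show -(PXF pvDxB cs v) - -(PXF pvDxB cs k) < max L2 0 + 1
            have := hprev' v hv1 hv2; omega)
        simp only [] at h
        omega
      · right; right; left
        rw [decide_eq_true_eq]
        have h := pvFirstCross (fun j => PXF pvDyB cs j) (max L3 0 + 1) (by omega) k u
          (fun j => by show PXF pvDyB cs (j + 1) ≤ PXF pvDyB cs j + 1; have := PXF_step pvDyB cs pvDyB_bound j; omega)
          hu (by show max L3 0 + 1 ≤ PXF pvDyB cs u - PXF pvDyB cs k; omega)
          (fun v hv1 hv2 => by
            show PXF pvDyB cs v - PXF pvDyB cs k < max L3 0 + 1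
            have := hprev' v hv1 hv2; omega)
        simp only [] at h
        omega
      · right; right; right
        rw [decide_eq_true_eq]
        have h := pvFirstCross (fun j => -(PXF pvDyB cs j)) (max L1 0 + 1) (by omega) k u
          (fun j => by show -(PXF pvDyB cs (j + 1)) ≤ -(PXF pvDyB cs j) + 1; have := PXF_step pvDyB cs pvDyB_bound j; omega)
          hu (by show max L1 0 + 1 ≤ -(PXF pvDyB cs u) - -(PXF pvDyB cs k); omega)
          (fun v hv1 hv2 => by
            show -(PXF pvDyB cs v) - -(PXF pvDyB cs k) < max L1 0 + 1
            have := hprev' v hv1 hv2; omega)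
        simp only [] at h
        omega
  unfold pvValB pvAns
  rw [hmin]
  rcases hF : (List.range' (k + 1) (cs.length - k)).find?
      (fun u => pvBadA L0 L1 L2 L3 (PXF pvDxB cs u - PXF pvDxB cs k)
        (PXF pvDyB cs u - PXF pvDyB cs k)) with _ | u
  · have hH : pvHit (fun u => pvBadA L0 L1 L2 L3 (PXF pvDxB cs u - PXF pvDxB cs k)
        (PXF pvDyB cs u - PXF pvDyB cs k)) k cs.length = (cs.length : Int) + 1 := by
      unfold pvHit; rw [hF]
    rw [hH, if_pos (by omega)]
  · obtain ⟨h1, h2, _, _⟩ := find?_range'_spec _ _ _ _ hF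
    have hH : pvHit (fun u => pvBadA L0 L1 L2 L3 (PXF pvDxB cs u - PXF pvDxB cs k)
        (PXF pvDyB cs u - PXF pvDyB cs k)) k cs.length = (u : Int) := by
      unfold pvHit; rw [hF]
    rw [hH, if_neg (by omega)]

theorem executeInstructions1_spec : Claim_equal_executeInstructions1 := by
  intro n sp s _ _
  unfold Spec_executeInstructions1
  simp only [executeInstructions1, executeInstructions1_alt]
  rw [pvGoB_spec _ _ _ _ s.toList s.toList.length (le_refl _)
      PySem.Dict.empty PySem.Dict.empty []
      (fun v => by rw [PySem.Dict.getD_empty, pvHitP_base])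
      (fun v => by rw [PySem.Dict.getD_empty, pvHitP_base])]
  rw [List.append_nil]
  apply List.map_congr_left
  intro i hi
  rw [List.mem_range] at hi
  rw [pvValB_eq_pvAns (n - 1 - (PySem.List.pyGet? sp 1).getD 0)
      (n - 1 - (PySem.List.pyGet? sp 0).getD 0)
      ((PySem.List.pyGet? sp 1).getD 0) ((PySem.List.pyGet? sp 0).getD 0) s.toList i hi]
  have h := pvGoA_spec (n - 1 - (PySem.List.pyGet? sp 1).getD 0)
      (n - 1 - (PySem.List.pyGet? sp 0).getD 0)
      ((PySem.List.pyGet? sp 1).getD 0) ((PySem.List.pyGet? sp 0).getD 0)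
      s.toList i (s.toList.length - i) i (le_refl _) (by omega) rfl
  simp only [sub_self] at h
  unfold pvAns
  exact h
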